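-- pv_equiv track=rewrite | github.com/Timsbim/AoC | 2023/day_18.py | looping
-- ===== SOURCE A (Python) =====
-- from itertools import groupby, pairwise, product
--
-- def looping(instructions):
--     loop, cols, rows = [(0, 0)], {0}, {0}
--     for direction, count in instructions:
--         y0, x0 = loop[-1]
--         if direction == "R":
--             y1, x1 = y0, x0 + count
--         elif direction == "D":
--             y1, x1 = y0 + count, x0
--         elif direction == "L":
--             y1, x1 = y0, x0 - count
--         else:  # direction == "U"
--             y1, x1 = y0 - count, x0
--         loop.append((y1, x1))
--         cols.add(y1)
--         rows.add(x1)
--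
--     # Build a slightly larger loop by filling in missing grid parts.
--     # Grid: defined by the loop points.
--     cols, rows = sorted(cols), sorted(rows)
--     grid = {
--         (y, x): (n, m)
--         for (n, y), (m, x) in product(enumerate(cols), enumerate(rows))
--     }
--     new_loop = []
--     for (y0, x0), (y1, x1) in pairwise(loop):
--         (n0, m0), (n1, m1) = grid[y0, x0], grid[y1, x1]
--         if n0 == n1:
--             ms = range(m0, m1) if m0 < m1 else range(m0, m1, -1)
--             col = cols[n1]
--             new_loop.extend((col, rows[m]) for m in ms)
--         else:
--             ns = range(n0, n1) if n0 < n1 else range(n0, n1, -1)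
--             row = rows[m1]
--             new_loop.extend((cols[n], row) for n in ns)
--
--     return new_loop
-- ===== SOURCE B (Python) =====
-- from itertools import accumulate, pairwise
--
-- def looping(instructions):
--     # No index structures at all: vertices via accumulate over delta vectors,
--     # then each segment's points come from value-range filtering of the
--     # sorted coordinate lists.
--     DELTA = {"R": (0, 1), "D": (1, 0), "L": (0, -1), "U": (-1, 0)}
--
--     def step(p, inst):
--         dy, dx = DELTA.get(inst[0], (-1, 0))
--         return p[0] + dy * inst[1], p[1] + dx * inst[1]
--
--     pts = list(accumulate(instructions, step, initial=(0, 0)))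
--     ys = sorted({y for y, _ in pts})
--     xs = sorted({x for _, x in pts})
--
--     out = []
--     for (y0, x0), (y1, x1) in pairwise(pts):
--         if y0 == y1:
--             if x0 < x1:
--                 out.extend((y0, v) for v in xs if x0 <= v < x1)
--             else:
--                 out.extend((y0, v) for v in reversed(xs) if x1 < v <= x0)
--         elif y0 < y1:
--             out.extend((v, x0) for v in ys if y0 <= v < y1)
--         else:
--             out.extend((v, x0) for v in reversed(ys) if y1 < v <= y0)
--     return out
-- ===== Notes on version B (the rewrite author's own statement) =====
-- stated objective: simpler
-- what changed: A compresses coordinates and materialises a dictionary over the full product of grid coordinates, then walks index ranges and re-fetches values by index; B never builds any index structure: it folds the instructions into vertices via delta vectors with accumulate and emits each segment's points by value-range filtering of the two sorted coordinate lists.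
import Mathlib
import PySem

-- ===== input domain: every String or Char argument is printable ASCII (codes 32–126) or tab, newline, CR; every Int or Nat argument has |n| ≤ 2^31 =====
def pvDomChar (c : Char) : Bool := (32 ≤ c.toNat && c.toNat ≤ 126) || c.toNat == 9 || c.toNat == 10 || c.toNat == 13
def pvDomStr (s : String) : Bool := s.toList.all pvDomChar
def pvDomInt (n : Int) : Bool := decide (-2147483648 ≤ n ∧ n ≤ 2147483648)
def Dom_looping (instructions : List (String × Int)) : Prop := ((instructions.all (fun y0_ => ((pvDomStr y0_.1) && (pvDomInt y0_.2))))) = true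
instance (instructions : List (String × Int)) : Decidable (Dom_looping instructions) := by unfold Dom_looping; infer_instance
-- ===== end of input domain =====

-- B builds the vertices by accumulating delta vectors and emits each segment by
-- value-range filtering of the sorted coordinate lists, with no grid or index
-- dictionary at all; same output as A.

-- ===== PORT A =====
-- loop body of A's first for-loop; loop[-1] via pyGetD is exact: loop is never empty
def pvStepA (st : List (Int × Int) × PySem.Set Int × PySem.Set Int) (dc : String × Int) :
    List (Int × Int) × PySem.Set Int × PySem.Set Int :=
  let p := PySem.List.pyGetD st.1 (-1) (0, 0)
  let q : Int × Int :=
    if dc.1 == "R" then (p.1, p.2 + dc.2)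
    else if dc.1 == "D" then (p.1 + dc.2, p.2)
    else if dc.1 == "L" then (p.1, p.2 - dc.2)
    else (p.1 - dc.2, p.2)
  (st.1 ++ [q], PySem.Set.add st.2.1 q.1, PySem.Set.add st.2.2 q.2)

-- {(y, x): (n, m) for (n, y), (m, x) in product(enumerate(cols), enumerate(rows))}
def pvGrid (cols rows : List Int) : PySem.Dict (Int × Int) (Int × Int) :=
  ((PySem.List.enumerate cols 0).flatMap
      (fun p => (PySem.List.enumerate rows 0).map (fun q => (p, q)))).foldl
    (fun d pq => d.insert (pq.1.2, pq.2.2) (pq.1.1, pq.2.1)) PySem.Dict.empty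

-- loop body of A's second for-loop; grid[y, x] via getD is exact (every loop vertex is
-- a grid point) and cols[n1]/rows[m]/rows[m1]/cols[n] via pyGetD are exact (in range)
def pvSegA (cols rows : List Int) (grid : PySem.Dict (Int × Int) (Int × Int))
    (acc : List (Int × Int)) (pr : (Int × Int) × Int × Int) : List (Int × Int) :=
  let nm0 := grid.getD (pr.1.1, pr.1.2) (0, 0)
  let nm1 := grid.getD (pr.2.1, pr.2.2) (0, 0)
  if nm0.1 == nm1.1 then
    let ms := if nm0.2 < nm1.2 then PySem.List.pyRange nm0.2 nm1.2 1
              else PySem.List.pyRange nm0.2 nm1.2 (-1)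
    let col := PySem.List.pyGetD cols nm1.1 0
    acc ++ ms.map (fun m => (col, PySem.List.pyGetD rows m 0))
  else
    let ns := if nm0.1 < nm1.1 then PySem.List.pyRange nm0.1 nm1.1 1
              else PySem.List.pyRange nm0.1 nm1.1 (-1)
    let row := PySem.List.pyGetD rows nm1.2 0
    acc ++ ns.map (fun n => (PySem.List.pyGetD cols n 0, row))

def looping (instructions : List (String × Int)) : List (Int × Int) :=
  let st := instructions.foldl pvStepA
    ([((0 : Int), (0 : Int))], PySem.Set.ofList [(0 : Int)], PySem.Set.ofList [(0 : Int)])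
  let cols := PySem.List.sorted st.2.1 (fun v => v) false
  let rows := PySem.List.sorted st.2.2 (fun v => v) false
  -- pairwise(loop) = zip(loop, loop[1:]) = zip of the list with its tail
  (st.1.zip st.1.tail).foldl (pvSegA cols rows (pvGrid cols rows)) []

-- ===== PORT B =====
-- DELTA = {"R": (0, 1), "D": (1, 0), "L": (0, -1), "U": (-1, 0)}
def pvDELTA : PySem.Dict String (Int × Int) :=
  ((((PySem.Dict.empty.insert "R" ((0 : Int), (1 : Int))).insert "D"
      ((1 : Int), (0 : Int))).insert "L" ((0 : Int), (-1 : Int))).insert "U"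
    ((-1 : Int), (0 : Int)))

-- step(p, inst): DELTA.get with default (-1, 0), then p + delta * count
def pvStepB (p : Int × Int) (inst : String × Int) : Int × Int :=
  let d := pvDELTA.getD inst.1 ((-1 : Int), (0 : Int))
  (p.1 + d.1 * inst.2, p.2 + d.2 * inst.2)

-- list(accumulate(instructions, step, initial=p))
def pvScan (p : Int × Int) : List (String × Int) → List (Int × Int)
  | [] => [p]
  | i :: rest => p :: pvScan (pvStepB p i) rest

-- loop body of B's second for-loop: value-range filters of the sorted axis lists
def pvSegB (ys xs : List Int) (out : List (Int × Int)) (pr : (Int × Int) × Int × Int) :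
    List (Int × Int) :=
  if pr.1.1 == pr.2.1 then
    if pr.1.2 < pr.2.2 then
      out ++ (xs.filter (fun v => decide (pr.1.2 ≤ v ∧ v < pr.2.2))).map (fun v => (pr.1.1, v))
    else
      out ++ (xs.reverse.filter (fun v => decide (pr.2.2 < v ∧ v ≤ pr.1.2))).map
        (fun v => (pr.1.1, v))
  else if pr.1.1 < pr.2.1 then
    out ++ (ys.filter (fun v => decide (pr.1.1 ≤ v ∧ v < pr.2.1))).map (fun v => (v, pr.1.2))
  else
    out ++ (ys.reverse.filter (fun v => decide (pr.2.1 < v ∧ v ≤ pr.1.1))).map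
      (fun v => (v, pr.1.2))

def looping_alt (instructions : List (String × Int)) : List (Int × Int) :=
  let pts := pvScan ((0 : Int), (0 : Int)) instructions
  let ys := PySem.List.sorted (PySem.Set.ofList (pts.map (fun p => p.1))) (fun v => v) false
  let xs := PySem.List.sorted (PySem.Set.ofList (pts.map (fun p => p.2))) (fun v => v) false
  (pts.zip (PySem.List.slice pts (some 1) none)).foldl (pvSegB ys xs) []

-- ===== PRECONDITION & SPEC =====
def Spec_looping (instructions : List (String × Int)) (out : List (Int × Int)) : Prop := out = looping_alt instructions
instance (instructions : List (String × Int)) (out : List (Int × Int)) : Decidable (Spec_looping instructions out) := by unfold Spec_looping; infer_instance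

-- ===== CLAIM (what is proved, stated in full; the proofs are below) =====
def Claim_equal_looping : Prop := ∀ (instructions : List (String × Int)), Dom_looping instructions → Spec_looping instructions (looping instructions)

-- ===== LEMMAS AND PROOFS =====

-- A's if-chain point update equals B's delta-dictionary point update.
theorem pv_step_eq (p : Int × Int) (dc : String × Int) :
    (if dc.1 == "R" then (p.1, p.2 + dc.2)
     else if dc.1 == "D" then (p.1 + dc.2, p.2)
     else if dc.1 == "L" then (p.1, p.2 - dc.2)
     else (p.1 - dc.2, p.2)) = pvStepB p dc := by
  unfold pvStepB pvDELTA
  by_cases h1 : dc.1 = "R"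
  · simp [h1, PySem.Dict.getD_insert]
  · by_cases h2 : dc.1 = "D"
    · simp [h1, h2, PySem.Dict.getD_insert]
    · by_cases h3 : dc.1 = "L"
      · simp [h2, h3, PySem.Dict.getD_insert, sub_eq_add_neg]
      · by_cases h4 : dc.1 = "U" <;>
          simp [h1, h2, h3, h4, PySem.Dict.getD_insert, PySem.Dict.getD_empty, sub_eq_add_neg]

-- each step keeps one coordinate fixed
theorem pv_step_rel (p : Int × Int) (dc : String × Int) :
    p.1 = (pvStepB p dc).1 ∨ p.2 = (pvStepB p dc).2 := by
  have h : (pvDELTA.getD dc.1 ((-1 : Int), (0 : Int))).1 = 0 ∨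
      (pvDELTA.getD dc.1 ((-1 : Int), (0 : Int))).2 = 0 := by
    unfold pvDELTA
    simp [PySem.Dict.getD_insert]
    split_ifs <;> simp
  unfold pvStepB
  rcases h with h | h
  · left; simp [h]
  · right; simp [h]

theorem pv_scan_head (ins : List (String × Int)) (p : Int × Int) :
    (pvScan p ins).head? = some p := by
  cases ins <;> rfl

theorem pv_scan_chain (ins : List (String × Int)) :
    ∀ p, List.IsChain (fun u w : Int × Int => u.1 = w.1 ∨ u.2 = w.2) (pvScan p ins) := by
  induction ins with
  | nil => intro p; simp [pvScan]
  | cons dc rest ih =>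
    intro p
    show List.IsChain _ (p :: pvScan (pvStepB p dc) rest)
    rw [List.isChain_cons]
    refine ⟨?_, ih _⟩
    intro b hb
    rw [pv_scan_head] at hb
    cases hb
    exact pv_step_rel p dc

-- Phase 1: A's (loop, cols-set, rows-set) fold equals the accumulate scan of B,
-- with the two sets exactly the sets of first/second coordinates of the list.
theorem pv_phase1 (ins : List (String × Int)) :
    ∀ (L : List (Int × Int)) (p : Int × Int),
    ins.foldl pvStepA (L ++ [p], PySem.Set.ofList ((L ++ [p]).map (fun q => q.1)),
        PySem.Set.ofList ((L ++ [p]).map (fun q => q.2)))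
      = (L ++ pvScan p ins, PySem.Set.ofList ((L ++ pvScan p ins).map (fun q => q.1)),
         PySem.Set.ofList ((L ++ pvScan p ins).map (fun q => q.2))) := by
  induction ins with
  | nil => intro L p; rfl
  | cons dc rest ih =>
    intro L p
    rw [List.foldl_cons]
    have hstep : pvStepA (L ++ [p], PySem.Set.ofList ((L ++ [p]).map (fun q => q.1)),
        PySem.Set.ofList ((L ++ [p]).map (fun q => q.2))) dc
        = ((L ++ [p]) ++ [pvStepB p dc],
           PySem.Set.ofList (((L ++ [p]) ++ [pvStepB p dc]).map (fun q => q.1)),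
           PySem.Set.ofList (((L ++ [p]) ++ [pvStepB p dc]).map (fun q => q.2))) := by
      show (_ ++ [_], _, _) = _
      rw [PySem.List.pyGetD_neg_one_append_singleton, pv_step_eq]
      simp only [List.map_append, List.map_cons, List.map_nil,
        PySem.Set.ofList_append_singleton]
    rw [hstep, ih (L ++ [p]) (pvStepB p dc)]
    show (_, _, _) = (_, _, _)
    simp only [List.append_assoc]
    rfl

-- strict monotonicity of a Pairwise-< list, both directions
theorem pv_idx_le (L : List Int) (hs : L.Pairwise (· < ·)) {i j : Nat}
    (hi : i < L.length) (hj : j < L.length) : L[i] ≤ L[j] ↔ i ≤ j := by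
  have mono := List.pairwise_iff_getElem.mp hs
  constructor
  · intro h
    by_contra hij
    push_neg at hij
    exact absurd h (not_le.mpr (mono j i hj hi hij))
  · intro h
    rcases Nat.lt_or_ge i j with h' | h'
    · exact le_of_lt (mono i j hi hj h')
    · have : i = j := by omega
      subst this; exact le_refl _

theorem pv_idx_lt (L : List Int) (hs : L.Pairwise (· < ·)) {i j : Nat}
    (hi : i < L.length) (hj : j < L.length) : L[i] < L[j] ↔ i < j := by
  rw [← not_le, ← not_le, pv_idx_le L hs hj hi]

-- a filter whose predicate is an index window is a drop/take slice
theorem pv_filter_slice (L : List Int) :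
    ∀ (p : Int → Bool) (a b : Nat),
    (∀ k (hk : k < L.length), p L[k] = decide (a ≤ k ∧ k < b)) →
    L.filter p = (L.drop a).take (b - a) := by
  induction L with
  | nil => intro p a b _; simp
  | cons c T ih =>
    intro p a b h
    have hc := h 0 (by simp)
    by_cases ha : a = 0
    · subst ha
      by_cases hb : b = 0
      · subst hb
        simp only [List.getElem_cons_zero, decide_eq_false_iff_not] at hc
        have hc' : p c = false := by
          have := h 0 (by simp)
          simpa using this
        have hT : T.filter p = [] := by
          rw [List.filter_eq_nil_iff]
          intro x hx
          obtain ⟨k, hk, rfl⟩ := List.getElem_of_mem hx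
          have := h (k + 1) (by simpa using Nat.succ_lt_succ hk)
          simp only [List.getElem_cons_succ] at this
          simp [this]
        simp [List.filter_cons, hc', hT]
      · have hb' : 0 < b := Nat.pos_of_ne_zero hb
        have hc' : p c = true := by
          have := h 0 (by simp)
          simpa [hb'] using this
        have hT := ih p 0 (b - 1) (by
          intro k hk
          have := h (k + 1) (by simpa using Nat.succ_lt_succ hk)
          simp only [List.getElem_cons_succ] at this
          rw [this]
          apply decide_eq_decide.mpr
          omega)
        have hbe : b = (b - 1) + 1 := by omega
        rw [List.filter_cons, if_pos hc', hT, List.drop_zero, List.drop_zero,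
          Nat.sub_zero, Nat.sub_zero]
        conv_rhs => rw [hbe, List.take_succ_cons]
    · have ha' : 0 < a := Nat.pos_of_ne_zero ha
      have hc' : p c = false := by
        have := h 0 (by simp)
        simp only [List.getElem_cons_zero] at this
        rw [this]
        simp; omega
      have hT := ih p (a - 1) (b - 1) (by
        intro k hk
        have := h (k + 1) (by simpa using Nat.succ_lt_succ hk)
        simp only [List.getElem_cons_succ] at this
        rw [this]
        apply decide_eq_decide.mpr
        omega)
      rw [List.filter_cons, if_neg (by simp [hc'])]
      rw [hT]
      have hae : a = (a - 1) + 1 := by omega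
      rw [hae, List.drop_succ_cons]
      congr 1
      omega

-- mapping list indexing over an ascending index range is a drop/take slice
theorem pv_range_slice (L : List Int) (a b : Nat) (hb : b ≤ L.length) :
    (PySem.List.pyRange (a : Int) (b : Int) 1).map (fun m => PySem.List.pyGetD L m 0)
      = (L.drop a).take (b - a) := by
  apply List.ext_getElem
  · simp only [List.length_map, PySem.List.length_pyRange_one, List.length_take,
      List.length_drop]
    omega
  · intro k h1 h2
    simp only [List.getElem_map, PySem.List.getElem_pyRange_one]
    have hk : a + k < L.length := by
      simp [PySem.List.length_pyRange_one] at h1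
      omega
    have : ((a : Int) + (k : Int)) = ((a + k : Nat) : Int) := by push_cast; ring
    rw [this, PySem.List.pyGetD_natCast, List.getD_eq_getElem _ _ hk]
    rw [List.getElem_take, List.getElem_drop]

-- the two windowed forms used by the segment proof
theorem pv_filter_eq_range (L : List Int) (hs : L.Pairwise (· < ·)) (a b : Nat)
    (ha : a < L.length) (hb : b < L.length) :
    L.filter (fun v => decide (L[a] ≤ v ∧ v < L[b]))
      = (PySem.List.pyRange (a : Int) (b : Int) 1).map (fun m => PySem.List.pyGetD L m 0) := by
  rw [pv_range_slice L a b (le_of_lt hb)]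
  apply pv_filter_slice
  intro k hk
  apply decide_eq_decide.mpr
  rw [pv_idx_le L hs ha hk, pv_idx_lt L hs hk hb]

theorem pv_filter_eq_range' (L : List Int) (hs : L.Pairwise (· < ·)) (a b : Nat)
    (ha : a < L.length) (hb : b < L.length) :
    L.filter (fun v => decide (L[b] < v ∧ v ≤ L[a]))
      = (PySem.List.pyRange ((b : Int) + 1) ((a : Int) + 1) 1).map
          (fun m => PySem.List.pyGetD L m 0) := by
  have h1 : ((b : Int) + 1) = ((b + 1 : Nat) : Int) := by push_cast; ring
  have h2 : ((a : Int) + 1) = ((a + 1 : Nat) : Int) := by push_cast; ring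
  rw [h1, h2, pv_range_slice L (b + 1) (a + 1) (by omega)]
  apply pv_filter_slice
  intro k hk
  apply decide_eq_decide.mpr
  rw [pv_idx_lt L hs hb hk, pv_idx_le L hs hk ha]
  omega

-- the product-grid dictionary looks up the pair of indices
theorem pv_grid_getD (C R : List Int) (hC : C.Nodup) (hR : R.Nodup)
    (n m : Nat) (hn : n < C.length) (hm : m < R.length) :
    (pvGrid C R).getD (C[n], R[m]) ((0 : Int), (0 : Int)) = ((n : Int), (m : Int)) := by
  have hkeymap : ∀ p : Int × Int,
      (PySem.List.enumerate R 0).map (fun q : Int × Int => (p.2, q.2))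
        = R.map (fun v => (p.2, v)) := by
    intro p
    conv_rhs => rw [← PySem.List.map_snd_enumerate R 0]
    rw [List.map_map]
    rfl
  have hkeysN : ((((PySem.List.enumerate C 0).flatMap
      (fun p => (PySem.List.enumerate R 0).map (fun q => (p, q))))).map
        (fun pq : (Int × Int) × Int × Int => (pq.1.2, pq.2.2))).Nodup := by
    rw [List.map_flatMap]
    refine List.nodup_flatMap.2 ⟨?_, ?_⟩
    · intro p _
      rw [List.map_map]
      show ((PySem.List.enumerate R 0).map (fun q : Int × Int => (p.2, q.2))).Nodup
      rw [hkeymap p]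
      exact hR.map (fun a b hab => (Prod.ext_iff.1 hab).2)
    · have hsnd : (PySem.List.enumerate C 0).Pairwise
          (fun p q : Int × Int => p.2 ≠ q.2) := by
        have h := hC
        rw [← PySem.List.map_snd_enumerate C 0] at h
        exact List.pairwise_map.1 h
      refine hsnd.imp ?_
      intro p q hne a ha hb
      have ha' : a ∈ (PySem.List.enumerate R 0).map (fun q' : Int × Int => (p.2, q'.2)) := by
        have h1 : a ∈ ((PySem.List.enumerate R 0).map (fun q' => (p, q'))).map
            (fun pq : (Int × Int) × Int × Int => (pq.1.2, pq.2.2)) := ha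
        rw [List.map_map] at h1
        exact h1
      have hb' : a ∈ (PySem.List.enumerate R 0).map (fun q' : Int × Int => (q.2, q'.2)) := by
        have h1 : a ∈ ((PySem.List.enumerate R 0).map (fun q' => (q, q'))).map
            (fun pq : (Int × Int) × Int × Int => (pq.1.2, pq.2.2)) := hb
        rw [List.map_map] at h1
        exact h1
      rw [hkeymap p] at ha'
      rw [hkeymap q] at hb'
      obtain ⟨v, _, rfl⟩ := List.mem_map.1 ha'
      obtain ⟨w, _, hw⟩ := List.mem_map.1 hb'
      exact hne ((Prod.ext_iff.1 hw).1.symm)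
  have hitems : (pvGrid C R).items
      = ((PySem.List.enumerate C 0).flatMap
          (fun p => (PySem.List.enumerate R 0).map (fun q => (p, q)))).map
        (fun pq => ((pq.1.2, pq.2.2), (pq.1.1, pq.2.1))) := by
    have h := PySem.Dict.items_foldl_insert_fresh
      ((PySem.List.enumerate C 0).flatMap
        (fun p => (PySem.List.enumerate R 0).map (fun q => (p, q))))
      (fun pq => (pq.1.2, pq.2.2)) (fun pq => (pq.1.1, pq.2.1)) PySem.Dict.empty
      (fun a _ => PySem.Dict.contains_empty _) hkeysN
    simpa [pvGrid] using h
  have hkeys : (pvGrid C R).keys.Nodup := by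
    show ((pvGrid C R).items.map (fun p => p.1)).Nodup
    rw [hitems, List.map_map]
    exact hkeysN
  have hlenC : n < (PySem.List.enumerate C 0).length := by
    rw [PySem.List.length_enumerate]; exact hn
  have hlenR : m < (PySem.List.enumerate R 0).length := by
    rw [PySem.List.length_enumerate]; exact hm
  have hmemEl : (((n : Int), C[n]), ((m : Int), R[m])) ∈ (PySem.List.enumerate C 0).flatMap
      (fun p => (PySem.List.enumerate R 0).map (fun q => (p, q))) := by
    refine List.mem_flatMap.2 ⟨((n : Int), C[n]), ?_, ?_⟩
    · have h := PySem.List.getElem_enumerate C 0 n hlenC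
      rw [show ((0 : Int) + (n : Int)) = (n : Int) by ring] at h
      rw [← h]; exact List.getElem_mem _
    · refine List.mem_map.2 ⟨((m : Int), R[m]), ?_, rfl⟩
      have h := PySem.List.getElem_enumerate R 0 m hlenR
      rw [show ((0 : Int) + (m : Int)) = (m : Int) by ring] at h
      rw [← h]; exact List.getElem_mem _
  have hmemIt : ((C[n], R[m]), ((n : Int), (m : Int))) ∈ (pvGrid C R).items := by
    rw [hitems]
    exact List.mem_map.2 ⟨_, hmemEl, rfl⟩
  exact PySem.Dict.getD_of_mem_items (pvGrid C R) hmemIt hkeys _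

-- Phase 2, per segment: A's grid-dict body equals B's value-filter body, for
-- axis-aligned segments whose coordinates lie on the sorted axis lists.
theorem pv_seg_eq (cols rows : List Int)
    (hc : cols.Pairwise (· < ·)) (hr : rows.Pairwise (· < ·))
    (acc : List (Int × Int)) (pr : (Int × Int) × Int × Int)
    (h01 : pr.1.1 ∈ cols) (h02 : pr.1.2 ∈ rows) (h11 : pr.2.1 ∈ cols) (h12 : pr.2.2 ∈ rows)
    (hone : pr.1.1 = pr.2.1 ∨ pr.1.2 = pr.2.2) :
    pvSegA cols rows (pvGrid cols rows) acc pr = pvSegB cols rows acc pr := by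
  have hcN : cols.Nodup := hc.imp (fun h => ne_of_lt h)
  have hrN : rows.Nodup := hr.imp (fun h => ne_of_lt h)
  obtain ⟨n0, hn0, e0⟩ := List.getElem_of_mem h01
  obtain ⟨m0, hm0, f0⟩ := List.getElem_of_mem h02
  obtain ⟨n1, hn1, e1⟩ := List.getElem_of_mem h11
  obtain ⟨m1, hm1, f1⟩ := List.getElem_of_mem h12
  have hg0 : (pvGrid cols rows).getD (pr.1.1, pr.1.2) ((0 : Int), (0 : Int))
      = ((n0 : Int), (m0 : Int)) := by
    rw [← e0, ← f0]; exact pv_grid_getD cols rows hcN hrN n0 m0 hn0 hm0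
  have hg1 : (pvGrid cols rows).getD (pr.2.1, pr.2.2) ((0 : Int), (0 : Int))
      = ((n1 : Int), (m1 : Int)) := by
    rw [← e1, ← f1]; exact pv_grid_getD cols rows hcN hrN n1 m1 hn1 hm1
  have hbeq : (((n0 : Int)) == ((n1 : Int))) = (pr.1.1 == pr.2.1) := by
    by_cases h : n0 = n1
    · have hval : pr.1.1 = pr.2.1 := by subst h; exact e0.symm.trans e1
      simp [h, hval]
    · have hval : pr.1.1 ≠ pr.2.1 := by
        rw [← e0, ← e1]; exact fun he => h (hcN.getElem_inj_iff.1 he)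
      simp [h, hval]
  have hcolget : PySem.List.pyGetD cols ((n1 : Int)) 0 = pr.2.1 := by
    rw [PySem.List.pyGetD_natCast, List.getD_eq_getElem _ _ hn1, e1]
  have hrowget : PySem.List.pyGetD rows ((m1 : Int)) 0 = pr.2.2 := by
    rw [PySem.List.pyGetD_natCast, List.getD_eq_getElem _ _ hm1, f1]
  simp only [pvSegA, pvSegB, hg0, hg1, hbeq, hcolget, hrowget]
  by_cases hY : pr.1.1 = pr.2.1
  · -- horizontal segment: y fixed
    have hn01 : n0 = n1 := hcN.getElem_inj_iff.1 (by rw [e0, e1, hY])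
    have hmlt : ((m0 : Int) < (m1 : Int)) ↔ (pr.1.2 < pr.2.2) := by
      rw [← f0, ← f1, pv_idx_lt rows hr hm0 hm1]
      exact ⟨fun h => by exact_mod_cast h, fun h => by exact_mod_cast h⟩
    simp only [hY, beq_self_eq_true, if_true]
    by_cases hlt : pr.1.2 < pr.2.2
    · rw [if_pos (hmlt.mpr hlt), if_pos hlt]
      congr 1
      rw [← f0, ← f1, pv_filter_eq_range rows hr m0 m1 hm0 hm1, List.map_map]
      apply List.map_congr_left
      intro m _
      simp [hY]
    · rw [if_neg (fun h => hlt (hmlt.mp h)), if_neg hlt]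
      congr 1
      rw [List.filter_reverse, ← f0, ← f1, pv_filter_eq_range' rows hr m0 m1 hm0 hm1,
        PySem.List.pyRange_neg_one_eq_reverse, List.map_reverse, List.map_reverse,
        List.map_map]
      simp [Function.comp]
  · -- vertical segment: x fixed
    have hX : pr.1.2 = pr.2.2 := hone.resolve_left hY
    have hnlt : ((n0 : Int) < (n1 : Int)) ↔ (pr.1.1 < pr.2.1) := by
      rw [← e0, ← e1, pv_idx_lt cols hc hn0 hn1]
      exact ⟨fun h => by exact_mod_cast h, fun h => by exact_mod_cast h⟩
    rw [if_neg (show ¬((pr.1.1 == pr.2.1) = true) by simp [hY])]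
    rw [if_neg (show ¬((pr.1.1 == pr.2.1) = true) by simp [hY])]
    by_cases hlt : pr.1.1 < pr.2.1
    · rw [if_pos (hnlt.mpr hlt), if_pos hlt]
      congr 1
      rw [← e0, ← e1, pv_filter_eq_range cols hc n0 n1 hn0 hn1, List.map_map]
      apply List.map_congr_left
      intro n _
      simp [hX]
    · rw [if_neg (fun h => hlt (hnlt.mp h)), if_neg hlt]
      congr 1
      rw [List.filter_reverse, ← e0, ← e1, pv_filter_eq_range' cols hc n0 n1 hn0 hn1,
        PySem.List.pyRange_neg_one_eq_reverse, List.map_reverse, List.map_reverse,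
        List.map_map]
      congr 1
      apply List.map_congr_left
      intro n _
      simp [hX]

-- a Chain' relation holds on every pair of the zip-with-tail
theorem pv_zip_tail_rel {α : Type} (R : α → α → Prop) (l : List α)
    (h : List.IsChain R l) : ∀ pr ∈ l.zip l.tail, R pr.1 pr.2 := by
  intro pr hpr
  obtain ⟨j, hj, hget⟩ := List.mem_iff_getElem.mp hpr
  have hjl : j + 1 < l.length := by
    simp [List.length_zip, List.length_tail] at hj
    omega
  have h1 : (l.zip l.tail)[j] = (l[j]'(by omega), l.tail[j]'(by
      simp [List.length_tail]; omega)) := List.getElem_zip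
  have h2 : l.tail[j]'(by simp [List.length_tail]; omega) = l[j + 1] :=
    List.getElem_tail _
  rw [h1, h2] at hget
  rw [← hget]
  exact List.IsChain.getElem h j hjl

-- ===== VERDICT (by name: the statement is the Claim_ definition above) =====
theorem looping_spec : Claim_equal_looping := by
  unfold Claim_equal_looping
  intro ins _
  unfold Spec_looping
  simp only [looping, looping_alt]
  have hfold := pv_phase1 ins [] ((0 : Int), (0 : Int))
  simp only [List.nil_append, List.map_cons, List.map_nil] at hfold
  rw [hfold]
  dsimp only
  rw [PySem.List.slice_from_one]
  set pts := pvScan ((0 : Int), (0 : Int)) ins with hpts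
  have hcS : (PySem.List.sorted (PySem.Set.ofList (pts.map (fun p : Int × Int => p.1))) (fun v => v) false).Pairwise (· < ·) :=
    PySem.List.sorted_ofList_pairwise_lt (pts.map (fun p : Int × Int => p.1))
  have hrS : (PySem.List.sorted (PySem.Set.ofList (pts.map (fun p : Int × Int => p.2))) (fun v => v) false).Pairwise (· < ·) :=
    PySem.List.sorted_ofList_pairwise_lt (pts.map (fun p : Int × Int => p.2))
  refine PySem.List.foldl_congr_mem _ _ _ _ ?_
  intro acc pr hpr
  have hrel : pr.1.1 = pr.2.1 ∨ pr.1.2 = pr.2.2 :=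
    pv_zip_tail_rel _ pts (pv_scan_chain ins _) pr hpr
  have hmem := List.of_mem_zip hpr
  have h1 : pr.1 ∈ pts := hmem.1
  have h2 : pr.2 ∈ pts := List.mem_of_mem_tail hmem.2
  exact pv_seg_eq _ _ hcS hrS acc pr
    ((PySem.List.mem_sorted _ _ _ _).2 ((PySem.Set.mem_ofList _ _).2 (List.mem_map_of_mem h1)))
    ((PySem.List.mem_sorted _ _ _ _).2 ((PySem.Set.mem_ofList _ _).2 (List.mem_map_of_mem h1)))
    ((PySem.List.mem_sorted _ _ _ _).2 ((PySem.Set.mem_ofList _ _).2 (List.mem_map_of_mem h2)))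
    ((PySem.List.mem_sorted _ _ _ _).2 ((PySem.Set.mem_ofList _ _).2 (List.mem_map_of_mem h2)))
    hrel
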